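-- pv_equiv track=rewrite | github.com/ProjectViventium/viventium | viventium_v0_4/voice-gateway/fallback_tts.py | _safe_markup_prefix_end
-- ===== SOURCE A (Python) =====
-- from typing import Callable, Optional, Sequence, Union
--
-- def _safe_markup_prefix_end(text: str) -> int:
--     """
--     Return the prefix length that is safe to sanitize without cutting through a structural token.
--
--     We buffer incomplete `<...` and `[...]` regions until they close so shared voice-control
--     sanitization can run on complete text only.
--     """
--
--     tag_start: Optional[int] = None
--     bracket_start: Optional[int] = None
--
--     for index, ch in enumerate(text):
--         if tag_start is None and bracket_start is None:
--             if ch == "<":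
--                 tag_start = index
--             elif ch == "[":
--                 bracket_start = index
--             continue
--
--         if tag_start is not None:
--             if ch == ">":
--                 tag_start = None
--             continue
--
--         if bracket_start is not None and ch == "]":
--             bracket_start = None
--
--     safe_end = len(text)
--     if tag_start is not None:
--         safe_end = min(safe_end, tag_start)
--     if bracket_start is not None:
--         safe_end = min(safe_end, bracket_start)
--     return safe_end
-- ===== SOURCE B (Python) =====
-- def _safe_markup_prefix_end(text: str) -> int:
--     """Search-and-skip: jump between delimiter positions with str.find instead of a per-character state machine."""
--     n = len(text)
--     pos = 0
--     while pos < n: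
--         lt = text.find("<", pos)
--         lb = text.find("[", pos)
--         if lt == -1 and lb == -1:
--             return n
--         if lt != -1 and (lb == -1 or lt < lb):
--             opener, closer = lt, ">"
--         else:
--             opener, closer = lb, "]"
--         close = text.find(closer, opener + 1)
--         if close == -1:
--             return opener
--         pos = close + 1
--     return n
-- ===== Notes on version B (the rewrite author's own statement) =====
-- stated objective: faster
-- what changed: Replaced A's per-character enumerate state machine (tag_start/bracket_start Optional state) with a search-and-skip cursor loop that jumps between delimiters via str.find, skipping whole closed tokens at a time in C-level scans.
import Mathlib
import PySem

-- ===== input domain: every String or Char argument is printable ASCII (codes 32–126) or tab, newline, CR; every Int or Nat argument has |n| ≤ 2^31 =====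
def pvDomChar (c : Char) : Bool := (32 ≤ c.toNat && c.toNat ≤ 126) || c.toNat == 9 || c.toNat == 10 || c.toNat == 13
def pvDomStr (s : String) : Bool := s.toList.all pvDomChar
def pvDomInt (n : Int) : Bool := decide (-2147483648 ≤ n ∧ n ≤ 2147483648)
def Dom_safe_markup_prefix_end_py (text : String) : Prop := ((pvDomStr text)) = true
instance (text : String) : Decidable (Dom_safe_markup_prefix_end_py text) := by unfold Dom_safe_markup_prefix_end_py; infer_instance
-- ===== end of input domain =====

-- B replaces A's per-character state machine by a search-and-skip loop of str.find delimiter jumps (objective: faster by a constant factor, measured; same O(n)).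


-- ===== PORT A =====
-- loop body of A: state = (tag_start, bracket_start), one step per (index, ch)
def pvStepA (st : Option Int × Option Int) (p : Int × Char) : Option Int × Option Int :=
  match st with
  | (none, none) =>
      if p.2 = '<' then (some p.1, none)
      else if p.2 = '[' then (none, some p.1)
      else (none, none)
  | (some t, b) => if p.2 = '>' then (none, b) else (some t, b)
  | (none, some bs) => if p.2 = ']' then (none, none) else (none, some bs)

def safe_markup_prefix_end_py (text : String) : Int :=
  let st := (PySem.List.enumerate text.toList 0).foldl pvStepA (none, none)
  let safe_end : Int := PySem.Str.len text
  let safe_end := match st.1 with | some t => min safe_end t | none => safe_end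
  match st.2 with | some b => min safe_end b | none => safe_end

-- ===== PORT B =====
-- str.find of a single char, found case, unpacked to indices (used by pvLoopB's termination proof and the equivalence proof)
lemma pv_ff_found (cs : List Char) (c : Char) (k : Nat) (hk : k ≤ cs.length)
    (h : PySem.Chars.findFrom cs [c] (k : Int) ≠ -1) :
    ∃ j : Nat, PySem.Chars.findFrom cs [c] (k : Int) = (j : Int) ∧ k ≤ j ∧ j < cs.length ∧
      cs[j]? = some c ∧ ∀ i, k ≤ i → i < j → cs[i]? ≠ some c := by
  obtain ⟨h1, h2, h3⟩ := PySem.Chars.findFrom_natCast_spec cs [c] k hk h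
  obtain ⟨t, ht⟩ := h2
  have hne : List.drop (PySem.Chars.findFrom cs [c] (k : Int)).toNat cs ≠ [] := by
    intro he; rw [he] at ht; simp at ht
  have hjlen : (PySem.Chars.findFrom cs [c] (k : Int)).toNat < cs.length := by
    have := List.drop_eq_nil_iff.not.mp hne; omega
  refine ⟨(PySem.Chars.findFrom cs [c] (k : Int)).toNat, by omega, by omega, hjlen, ?_, ?_⟩
  · have h0 : (List.drop (PySem.Chars.findFrom cs [c] (k : Int)).toNat cs)[0]? = some c := by
      rw [← ht]; simp
    have hd := List.getElem?_drop (xs := cs) (i := (PySem.Chars.findFrom cs [c] (k : Int)).toNat) (j := 0)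
    rw [hd] at h0; simpa using h0
  · intro i hki hij hgc
    apply h3 i hki hij
    have hi : i < cs.length := by omega
    refine ⟨cs.drop (i + 1), ?_⟩
    rw [List.drop_eq_getElem_cons hi]
    have hci : cs[i] = c := by
      rw [List.getElem?_eq_getElem hi] at hgc; exact Option.some.inj hgc
    simp [hci]

-- the while-loop of Source B: pos cursor, delimiter jumps via str.find (PySem.Chars.findFrom)
def pvLoopB (cs : List Char) (pos : Nat) : Int :=
  if hp : pos < cs.length then
    let lt := PySem.Chars.findFrom cs ['<'] (pos : Int)
    let lb := PySem.Chars.findFrom cs ['['] (pos : Int)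
    if lt = -1 ∧ lb = -1 then (cs.length : Int)
    else
      let oc : Int × Char := if lt ≠ -1 ∧ (lb = -1 ∨ lt < lb) then (lt, '>') else (lb, ']')
      let close := PySem.Chars.findFrom cs [oc.2] (oc.1 + 1)
      if hcl : close = -1 then oc.1 else pvLoopB cs (close.toNat + 1)
  else (cs.length : Int)
  termination_by cs.length - pos
  decreasing_by
    simp only [close, oc, lt, lb] at hcl ⊢
    by_cases h : PySem.Chars.findFrom cs ['<'] (pos : Int) ≠ -1 ∧
        (PySem.Chars.findFrom cs ['['] (pos : Int) = -1 ∨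
          PySem.Chars.findFrom cs ['<'] (pos : Int) < PySem.Chars.findFrom cs ['['] (pos : Int))
    · rw [dif_pos h] at hcl ⊢
      obtain ⟨j, hj, hkj, hjlen, -, -⟩ := pv_ff_found cs '<' pos (by omega) h.1
      rw [hj] at hcl ⊢
      have hcast : ((j : Int) + 1) = ((j + 1 : Nat) : Int) := by push_cast; ring
      rw [hcast] at hcl ⊢
      obtain ⟨m, hm, hm1, hmlen, -, -⟩ := pv_ff_found cs '>' (j + 1) (by omega) hcl
      rw [hm]; simp; omega
    · rw [dif_neg h] at hcl ⊢
      have hlb : PySem.Chars.findFrom cs ['['] (pos : Int) ≠ -1 := by tauto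
      obtain ⟨j, hj, hkj, hjlen, -, -⟩ := pv_ff_found cs '[' pos (by omega) hlb
      rw [hj] at hcl ⊢
      have hcast : ((j : Int) + 1) = ((j + 1 : Nat) : Int) := by push_cast; ring
      rw [hcast] at hcl ⊢
      obtain ⟨m, hm, hm1, hmlen, -, -⟩ := pv_ff_found cs ']' (j + 1) (by omega) hcl
      rw [hm]; simp; omega

def safe_markup_prefix_end_py_alt (text : String) : Int :=
  pvLoopB text.toList 0

-- ===== PRECONDITION & SPEC =====
def Spec_safe_markup_prefix_end_py (text : String) (out : Int) : Prop := out = safe_markup_prefix_end_py_alt text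
instance (text : String) (out : Int) : Decidable (Spec_safe_markup_prefix_end_py text out) := by unfold Spec_safe_markup_prefix_end_py; infer_instance

-- ===== CLAIM (what is proved, stated in full; the proofs are below) =====
def Claim_equal_safe_markup_prefix_end_py : Prop := ∀ (text : String), Dom_safe_markup_prefix_end_py text → Spec_safe_markup_prefix_end_py text (safe_markup_prefix_end_py text)

-- ===== LEMMAS AND PROOFS =====

-- A's final min-computation
def pvFinal (len : Int) (st : Option Int × Option Int) : Int :=
  let s1 := match st.1 with | some t => min len t | none => len
  match st.2 with | some b => min s1 b | none => s1

-- A's fold + finalization, started at an arbitrary cursor, over the corresponding suffix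
def pvFoldFrom (cs : List Char) (pos : Nat) : Int :=
  pvFinal (cs.length : Int) ((PySem.List.enumerate (cs.drop pos) (pos : Int)).foldl pvStepA (none, none))

lemma pv_A_eq_foldFrom (text : String) : safe_markup_prefix_end_py text = pvFoldFrom text.toList 0 := by
  simp [safe_markup_prefix_end_py, pvFoldFrom, pvFinal, PySem.Str.len_eq]

-- str.find of a single char: not-found case
lemma pv_ff_none (cs : List Char) (c : Char) (k : Nat) (hk : k ≤ cs.length) :
    PySem.Chars.findFrom cs [c] (k : Int) = -1 ↔ c ∉ cs.drop k := by
  rw [PySem.Chars.findFrom_natCast_eq_neg_one_iff cs [c] k hk, List.singleton_infix_iff]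

-- fold over a segment on which pvStepA fixes the state
lemma pv_fold_const (m : List Char) (i : Int) (st : Option Int × Option Int)
    (h : ∀ (ix : Int) (c : Char), c ∈ m → pvStepA st (ix, c) = st) :
    (PySem.List.enumerate m i).foldl pvStepA st = st := by
  induction m generalizing i with
  | nil => simp [PySem.List.enumerate]
  | cons x xs ih =>
      rw [PySem.List.enumerate_cons, List.foldl_cons, h i x (by simp)]
      exact ih _ (fun ix c hc => h ix c (by simp [hc]))

-- seek: the fold from cursor p keeps state st until the first index j whose char triggers a transition
lemma pv_fold_seek (cs : List Char) (p j : Nat) (st : Option Int × Option Int) (trig : Char → Prop)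
    (hstep : ∀ (i : Int) (c : Char), ¬ trig c → pvStepA st (i, c) = st)
    (hpj : p ≤ j) (hjlen : j < cs.length)
    (hmin : ∀ (i : Nat) (hi : i < cs.length), p ≤ i → i < j → ¬ trig cs[i]) :
    (PySem.List.enumerate (cs.drop p) (p : Int)).foldl pvStepA st
      = (PySem.List.enumerate (cs.drop (j + 1)) ((j + 1 : Nat) : Int)).foldl pvStepA (pvStepA st ((j : Int), cs[j])) := by
  have hdecomp : cs.drop p = (cs.drop p).take (j - p) ++ cs[j] :: cs.drop (j + 1) := by
    have h1 : cs.drop p = (cs.drop p).take (j - p) ++ (cs.drop p).drop (j - p) := (List.take_append_drop _ _).symm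
    have h2 : (cs.drop p).drop (j - p) = cs.drop j := by rw [List.drop_drop]; congr 1; omega
    have h3 : cs.drop j = cs[j] :: cs.drop (j + 1) := List.drop_eq_getElem_cons hjlen
    conv_lhs => rw [h1, h2, h3]
  have hmlen : ((cs.drop p).take (j - p)).length = j - p := by
    simp [List.length_take, List.length_drop]; omega
  rw [hdecomp, PySem.List.enumerate_append, List.foldl_append]
  rw [pv_fold_const _ _ st ?_]
  · rw [PySem.List.enumerate_cons, List.foldl_cons]
    have hidx : (p : Int) + ((cs.drop p).take (j - p)).length = (j : Int) := by
      rw [hmlen]; push_cast; omega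
    rw [hidx]
    have hidx2 : ((j : Int) + 1) = ((j + 1 : Nat) : Int) := by push_cast; ring
    rw [hidx2]
  · intro ix c hc
    obtain ⟨i', hi', hgi⟩ := List.getElem_of_mem hc
    have hi'2 : i' < j - p := by omega
    have hi'3 : p + i' < cs.length := by omega
    have : c = cs[p + i'] := by
      rw [← hgi, List.getElem_take, List.getElem_drop]
    exact hstep ix c (this ▸ hmin (p + i') hi'3 (by omega) (by omega))

-- B's loop unfolded in the "earliest opener is a tag" case
lemma pvLoopB_tag (cs : List Char) (pos : Nat) (hp : pos < cs.length)
    (hcond : PySem.Chars.findFrom cs ['<'] (pos : Int) ≠ -1 ∧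
      (PySem.Chars.findFrom cs ['['] (pos : Int) = -1 ∨
        PySem.Chars.findFrom cs ['<'] (pos : Int) < PySem.Chars.findFrom cs ['['] (pos : Int))) :
    pvLoopB cs pos =
      if PySem.Chars.findFrom cs ['>'] (PySem.Chars.findFrom cs ['<'] (pos : Int) + 1) = -1
      then PySem.Chars.findFrom cs ['<'] (pos : Int)
      else pvLoopB cs ((PySem.Chars.findFrom cs ['>'] (PySem.Chars.findFrom cs ['<'] (pos : Int) + 1)).toNat + 1) := by
  rw [pvLoopB]
  have h1 : ¬(PySem.Chars.findFrom cs ['<'] (pos : Int) = -1 ∧ PySem.Chars.findFrom cs ['['] (pos : Int) = -1) :=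
    fun h => hcond.1 h.1
  simp only [dif_pos hp, if_neg h1, if_pos hcond, dite_eq_ite]

-- B's loop unfolded in the "earliest opener is a bracket" case
lemma pvLoopB_br (cs : List Char) (pos : Nat) (hp : pos < cs.length)
    (hno : ¬(PySem.Chars.findFrom cs ['<'] (pos : Int) = -1 ∧ PySem.Chars.findFrom cs ['['] (pos : Int) = -1))
    (hcond : ¬(PySem.Chars.findFrom cs ['<'] (pos : Int) ≠ -1 ∧
      (PySem.Chars.findFrom cs ['['] (pos : Int) = -1 ∨
        PySem.Chars.findFrom cs ['<'] (pos : Int) < PySem.Chars.findFrom cs ['['] (pos : Int)))) :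
    pvLoopB cs pos =
      if PySem.Chars.findFrom cs [']'] (PySem.Chars.findFrom cs ['['] (pos : Int) + 1) = -1
      then PySem.Chars.findFrom cs ['['] (pos : Int)
      else pvLoopB cs ((PySem.Chars.findFrom cs [']'] (PySem.Chars.findFrom cs ['['] (pos : Int) + 1)).toNat + 1) := by
  rw [pvLoopB]
  simp only [dif_pos hp, if_neg hno, if_neg hcond, dite_eq_ite]

-- B's loop when there is no opener at or after pos
lemma pvLoopB_noopen (cs : List Char) (pos : Nat) (hp : pos < cs.length)
    (hno : PySem.Chars.findFrom cs ['<'] (pos : Int) = -1 ∧ PySem.Chars.findFrom cs ['['] (pos : Int) = -1) :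
    pvLoopB cs pos = (cs.length : Int) := by
  rw [pvLoopB]; simp only [dif_pos hp, if_pos hno]

-- membership in a suffix from an index fact
lemma pv_mem_drop (cs : List Char) (p i : Nat) (c : Char) (hp : p ≤ i) (hi : i < cs.length)
    (h : cs[i]? = some c) : c ∈ cs.drop p := by
  have h2 : (cs.drop p)[i - p]? = some c := by
    rw [List.getElem?_drop]
    have : p + (i - p) = i := by omega
    rw [this, h]
  exact List.mem_of_getElem? h2

-- the main induction: A's fold-from-pos equals B's loop-from-pos
lemma pv_main (k : Nat) : ∀ (cs : List Char) (pos : Nat), cs.length - pos ≤ k → pos ≤ cs.length →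
    pvFoldFrom cs pos = pvLoopB cs pos := by
  induction k with
  | zero =>
      intro cs pos hk hple
      have hpe : pos = cs.length := by omega
      rw [pvLoopB]
      simp [pvFoldFrom, pvFinal, hpe, List.drop_of_length_le (le_refl cs.length), PySem.List.enumerate]
  | succ k ih =>
      intro cs pos hk hple
      by_cases hp : pos < cs.length
      · by_cases hno : PySem.Chars.findFrom cs ['<'] (pos : Int) = -1 ∧ PySem.Chars.findFrom cs ['['] (pos : Int) = -1
        · -- no opener at or after pos: both return len
          have h1 := (pv_ff_none cs '<' pos (by omega)).mp hno.1
          have h2 := (pv_ff_none cs '[' pos (by omega)).mp hno.2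
          rw [pvLoopB_noopen cs pos hp hno]
          unfold pvFoldFrom
          rw [pv_fold_const _ _ _ ?_]
          · simp [pvFinal]
          · intro ix c hc
            have hlt : c ≠ '<' := by rintro rfl; exact h1 hc
            have hlb : c ≠ '[' := by rintro rfl; exact h2 hc
            simp [pvStepA, hlt, hlb]
        · by_cases hcond : PySem.Chars.findFrom cs ['<'] (pos : Int) ≠ -1 ∧
              (PySem.Chars.findFrom cs ['['] (pos : Int) = -1 ∨
                PySem.Chars.findFrom cs ['<'] (pos : Int) < PySem.Chars.findFrom cs ['['] (pos : Int))
          · -- earliest opener is '<' at index o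
            obtain ⟨o, ho, hpo, holen, hoc, homin⟩ := pv_ff_found cs '<' pos (by omega) hcond.1
            have hocs : cs[o] = '<' := by
              rw [List.getElem?_eq_getElem holen] at hoc; exact Option.some.inj hoc
            have hnob : ∀ (i : Nat), i < cs.length → pos ≤ i → i < o → cs[i]? ≠ some '[' := by
              intro i hilen h1 h2 hmem
              rcases hcond.2 with hb | hb
              · exact (pv_ff_none cs '[' pos (by omega)).mp hb (pv_mem_drop cs pos i '[' h1 hilen hmem)
              · have hlbne : PySem.Chars.findFrom cs ['['] (pos : Int) ≠ -1 := by
                  intro he; rw [he, ho] at hb; omega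
                obtain ⟨b', hb', hpb', hblen', hbc', hbmin'⟩ := pv_ff_found cs '[' pos (by omega) hlbne
                exact hbmin' i h1 (by rw [ho, hb'] at hb; omega) hmem
            -- A's fold reaches state (some o, none) at cursor o+1
            have hseek1 : (PySem.List.enumerate (cs.drop pos) (pos : Int)).foldl pvStepA (none, none)
                = (PySem.List.enumerate (cs.drop (o + 1)) ((o + 1 : Nat) : Int)).foldl pvStepA (some (o : Int), none) := by
              rw [pv_fold_seek cs pos o (none, none) (fun c => c = '<' ∨ c = '[')
                (fun i c hc => by
                  push_neg at hc
                  simp [pvStepA, hc.1, hc.2]) hpo holen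
                (fun i hi h1 h2 => by
                  push_neg
                  constructor
                  · intro he; exact homin i h1 h2 (by rw [List.getElem?_eq_getElem hi, he])
                  · intro he; exact hnob i hi h1 h2 (by rw [List.getElem?_eq_getElem hi, he]))]
              rw [hocs]; simp [pvStepA]
            rw [pvLoopB_tag cs pos hp hcond, ho]
            by_cases hclv : PySem.Chars.findFrom cs ['>'] ((o : Int) + 1) = -1
            · -- tag never closes: A returns o via the min, B returns the opener
              rw [if_pos hclv]
              have hcast : ((o : Int) + 1) = ((o + 1 : Nat) : Int) := by push_cast; ring
              rw [hcast] at hclv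
              have hnogt := (pv_ff_none cs '>' (o + 1) (by omega)).mp hclv
              unfold pvFoldFrom
              rw [hseek1, pv_fold_const _ _ _ ?_]
              · simp [pvFinal]; omega
              · intro ix c hc
                have : c ≠ '>' := by rintro rfl; exact hnogt hc
                simp [pvStepA, this]
            · -- tag closes at cl: both continue from cl+1
              rw [if_neg hclv]
              have hcast : ((o : Int) + 1) = ((o + 1 : Nat) : Int) := by push_cast; ring
              rw [hcast] at hclv ⊢
              obtain ⟨cl, hcl, hocl, hcllen, hclc, hclmin⟩ := pv_ff_found cs '>' (o + 1) (by omega) hclv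
              have hclcs : cs[cl] = '>' := by
                rw [List.getElem?_eq_getElem hcllen] at hclc; exact Option.some.inj hclc
              have hseek2 : (PySem.List.enumerate (cs.drop (o + 1)) ((o + 1 : Nat) : Int)).foldl pvStepA (some (o : Int), none)
                  = (PySem.List.enumerate (cs.drop (cl + 1)) ((cl + 1 : Nat) : Int)).foldl pvStepA (none, none) := by
                rw [pv_fold_seek cs (o + 1) cl (some (o : Int), none) (fun c => c = '>')
                  (fun i c hc => by simp [pvStepA, hc]) hocl hcllen
                  (fun i hi h1 h2 => by
                    intro he
                    exact hclmin i h1 h2 (by rw [List.getElem?_eq_getElem hi, he]))]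
                rw [hclcs]; simp [pvStepA]
              rw [hcl]
              have : ((cl : Int)).toNat = cl := by omega
              rw [this]
              rw [← ih cs (cl + 1) (by omega) (by omega)]
              unfold pvFoldFrom
              rw [hseek1, hseek2]
          · -- earliest opener is '[' at index o
            have hlbne : PySem.Chars.findFrom cs ['['] (pos : Int) ≠ -1 := by tauto
            obtain ⟨o, ho, hpo, holen, hoc, homin⟩ := pv_ff_found cs '[' pos (by omega) hlbne
            have hocs : cs[o] = '[' := by
              rw [List.getElem?_eq_getElem holen] at hoc; exact Option.some.inj hoc
            have hnot : ∀ (i : Nat), i < cs.length → pos ≤ i → i < o → cs[i]? ≠ some '<' := by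
              intro i hilen h1 h2 hmem
              by_cases hlt : PySem.Chars.findFrom cs ['<'] (pos : Int) = -1
              · exact (pv_ff_none cs '<' pos (by omega)).mp hlt (pv_mem_drop cs pos i '<' h1 hilen hmem)
              · obtain ⟨t', ht', hpt', htlen', htc', htmin'⟩ := pv_ff_found cs '<' pos (by omega) hlt
                have : ¬ PySem.Chars.findFrom cs ['<'] (pos : Int) < PySem.Chars.findFrom cs ['['] (pos : Int) := by tauto
                exact htmin' i h1 (by rw [ho, ht'] at this; omega) hmem
            have hseek1 : (PySem.List.enumerate (cs.drop pos) (pos : Int)).foldl pvStepA (none, none)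
                = (PySem.List.enumerate (cs.drop (o + 1)) ((o + 1 : Nat) : Int)).foldl pvStepA (none, some (o : Int)) := by
              rw [pv_fold_seek cs pos o (none, none) (fun c => c = '<' ∨ c = '[')
                (fun i c hc => by
                  push_neg at hc
                  simp [pvStepA, hc.1, hc.2]) hpo holen
                (fun i hi h1 h2 => by
                  push_neg
                  constructor
                  · intro he; exact hnot i hi h1 h2 (by rw [List.getElem?_eq_getElem hi, he])
                  · intro he; exact homin i h1 h2 (by rw [List.getElem?_eq_getElem hi, he]))]
              rw [hocs]; simp [pvStepA]
            rw [pvLoopB_br cs pos hp hno hcond, ho]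
            by_cases hclv : PySem.Chars.findFrom cs [']'] ((o : Int) + 1) = -1
            · rw [if_pos hclv]
              have hcast : ((o : Int) + 1) = ((o + 1 : Nat) : Int) := by push_cast; ring
              rw [hcast] at hclv
              have hnogt := (pv_ff_none cs ']' (o + 1) (by omega)).mp hclv
              unfold pvFoldFrom
              rw [hseek1, pv_fold_const _ _ _ ?_]
              · simp [pvFinal]; omega
              · intro ix c hc
                have : c ≠ ']' := by rintro rfl; exact hnogt hc
                simp [pvStepA, this]
            · rw [if_neg hclv]
              have hcast : ((o : Int) + 1) = ((o + 1 : Nat) : Int) := by push_cast; ring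
              rw [hcast] at hclv ⊢
              obtain ⟨cl, hcl, hocl, hcllen, hclc, hclmin⟩ := pv_ff_found cs ']' (o + 1) (by omega) hclv
              have hclcs : cs[cl] = ']' := by
                rw [List.getElem?_eq_getElem hcllen] at hclc; exact Option.some.inj hclc
              have hseek2 : (PySem.List.enumerate (cs.drop (o + 1)) ((o + 1 : Nat) : Int)).foldl pvStepA (none, some (o : Int))
                  = (PySem.List.enumerate (cs.drop (cl + 1)) ((cl + 1 : Nat) : Int)).foldl pvStepA (none, none) := by
                rw [pv_fold_seek cs (o + 1) cl (none, some (o : Int)) (fun c => c = ']')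
                  (fun i c hc => by simp [pvStepA, hc]) hocl hcllen
                  (fun i hi h1 h2 => by
                    intro he
                    exact hclmin i h1 h2 (by rw [List.getElem?_eq_getElem hi, he]))]
                rw [hclcs]; simp [pvStepA]
              rw [hcl]
              have : ((cl : Int)).toNat = cl := by omega
              rw [this]
              rw [← ih cs (cl + 1) (by omega) (by omega)]
              unfold pvFoldFrom
              rw [hseek1, hseek2]
      · have hpe : pos = cs.length := by omega
        rw [pvLoopB]
        simp [pvFoldFrom, pvFinal, hpe, List.drop_of_length_le (le_refl cs.length), PySem.List.enumerate]

-- ===== VERDICT (by name: the statement is the Claim_ definition above) =====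
theorem safe_markup_prefix_end_py_spec : Claim_equal_safe_markup_prefix_end_py := by
  intro text _
  unfold Spec_safe_markup_prefix_end_py safe_markup_prefix_end_py_alt
  rw [pv_A_eq_foldFrom]
  exact pv_main text.toList.length text.toList 0 (by omega) (by omega)
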